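-- pv_equiv track=rewrite | github.com/AlexTuisov/HW3 | HW3_submission/83_submission/hw3.py | result
-- ===== SOURCE A (Python) =====
-- def result(state, action): #from HW1
--     """Return the state that results from executing the given
--     action in the given state. The action must be one of
--     self.actions(state)."""
--
--     #Do we need to check "the action must be one of self.actions(state)"?
--     action_indexes = []
--     for sub in action:
--         action_indexes.append(sub[1])
--
--     #see where S was located, to update infected areas (only sick areas that are not quarantined):
--     S_locations = []
--     for i, row in enumerate(state):
--         for j, area in enumerate(row):
--             if area[0] == 'S' and (i,j) not in action_indexes:
--                 S_locations.append((i,j))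
--
--     new_map = []
--     for i, row in enumerate(state):
--         temp_row = []
--         for j, area in enumerate(row):
--             #change according to action:
--             if (i,j) in action_indexes:
--                 if area[0] == 'S': #area contains S
--                     temp_row.append(('Q', 1))
--                 else: #area contains H
--                     temp_row.append(('I', 1))
--
--             #change according to infection/time passing:
--             elif area[0] == 'H': #infection
--                 if (i+1,j) in S_locations or (i-1, j) in S_locations or (i, j+1) in S_locations or (i, j-1) in S_locations:
--                     temp_row.append(('S', 1))
--                 else:
--                     temp_row.append(('H', area[1]+1))
--             elif area[0] == 'S' and area[1] == 3: #time passing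
--                 temp_row.append(('H', 1))
--             elif area[0] == 'Q' and area[1] == 1: # if one turn had passed since became Q, protected infection twice
--                 temp_row.append(('H', 1))
--             else:
--                 temp_row.append((area[0], area[1]+1))
--         new_map.append(tuple(temp_row))
--     new_state = tuple(new_map)
--
--     return new_state
-- ===== SOURCE B (Python) =====
-- def result(state, action):
--     action_set = {sub[1] for sub in action}
--     R = len(state)
--
--     # pass 1: time passing only (S at 3 and Q at 1 recover, everything else ages)
--     new = []
--     for row in state:
--         nrow = []
--         for kind, t in row:
--             if (kind == 'S' and t == 3) or (kind == 'Q' and t == 1):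
--                 nrow.append(('H', 1))
--             else:
--                 nrow.append((kind, t + 1))
--         new.append(nrow)
--
--     # pass 2: scatter infection from each non-quarantined sick cell onto healthy neighbours
--     for i, row in enumerate(state):
--         for j, area in enumerate(row):
--             if area[0] == 'S' and (i, j) not in action_set:
--                 for ni, nj in ((i + 1, j), (i - 1, j), (i, j + 1), (i, j - 1)):
--                     if 0 <= ni < R and 0 <= nj < len(state[ni]) and state[ni][nj][0] == 'H':
--                         new[ni][nj] = ('S', 1)
--
--     # pass 3: apply the action; indexes outside the grid are ignored (they never hit a cell)
--     for _name, (i, j) in action: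
--         if 0 <= i < R and 0 <= j < len(state[i]):
--             new[i][j] = ('Q', 1) if state[i][j][0] == 'S' else ('I', 1)
--
--     return tuple(tuple(r) for r in new)
-- ===== Notes on version B (the rewrite author's own statement) =====
-- stated objective: faster
-- what changed: Replaces A's single build pass with per-cell branches and per-H-cell neighbour scans of a sick-location list by three staged passes over a mutable grid: a time-passing map, a scatter pass that writes ('S',1) onto healthy neighbours of each non-quarantined sick cell, and an action pass that overwrites action cells by direct assignment; the per-cell list scans disappear.
import Mathlib
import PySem

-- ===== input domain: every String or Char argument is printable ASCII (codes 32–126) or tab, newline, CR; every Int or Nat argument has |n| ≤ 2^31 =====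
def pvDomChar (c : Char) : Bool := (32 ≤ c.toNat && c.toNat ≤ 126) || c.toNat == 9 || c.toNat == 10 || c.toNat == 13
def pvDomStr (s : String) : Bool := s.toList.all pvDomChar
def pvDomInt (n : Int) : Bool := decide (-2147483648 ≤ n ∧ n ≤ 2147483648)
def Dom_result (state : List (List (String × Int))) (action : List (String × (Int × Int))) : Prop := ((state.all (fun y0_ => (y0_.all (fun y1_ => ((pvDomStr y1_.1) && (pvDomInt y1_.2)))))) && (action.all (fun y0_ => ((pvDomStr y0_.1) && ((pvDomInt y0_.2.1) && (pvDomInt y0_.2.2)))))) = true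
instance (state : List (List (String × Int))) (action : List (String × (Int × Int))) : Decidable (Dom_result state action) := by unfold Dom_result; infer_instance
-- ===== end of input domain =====

-- B recomputes the grid in three staged passes over a mutable copy (time-passing map,
-- infection scattered from sick cells by assignment, action applied by assignment)
-- instead of A's single build pass with per-cell membership scans; same results.

-- ===== PORT A =====
def result (state : List (List (String × Int))) (action : List (String × (Int × Int))) : List (List (String × Int)) :=
  let action_indexes : List (Int × Int) :=
    action.foldl (fun acc sub => acc ++ [sub.2]) []
  let S_locations : List (Int × Int) :=
    (PySem.List.enumerate state).foldl (fun acc p =>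
      (PySem.List.enumerate p.2).foldl (fun acc2 q =>
        if q.2.1 == "S" && !(action_indexes.contains (p.1, q.1)) then acc2 ++ [(p.1, q.1)]
        else acc2) acc) []
  (PySem.List.enumerate state).foldl (fun nm p =>
    nm ++ [(PySem.List.enumerate p.2).foldl (fun tr q =>
      tr ++ [ if action_indexes.contains (p.1, q.1) then
                (if q.2.1 == "S" then ("Q", (1 : Int)) else ("I", 1))
              else if q.2.1 == "H" then
                (if S_locations.contains (p.1 + 1, q.1) || S_locations.contains (p.1 - 1, q.1)
                    || S_locations.contains (p.1, q.1 + 1) || S_locations.contains (p.1, q.1 - 1)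
                 then ("S", 1) else ("H", q.2.2 + 1))
              else if q.2.1 == "S" && q.2.2 == 3 then ("H", 1)
              else if q.2.1 == "Q" && q.2.2 == 1 then ("H", 1)
              else (q.2.1, q.2.2 + 1) ]) []]) []

-- ===== PORT B =====
-- state[i] for an in-bounds Int index (Source B only reads it under the 0 ≤ i < len guard)
def pvRow (state : List (List (String × Int))) (i : Int) : List (String × Int) :=
  state.getD i.toNat []
-- state[i][j] under the same guard
def pvCell (state : List (List (String × Int))) (i j : Int) : String × Int :=
  (pvRow state i).getD j.toNat ("", 0)
-- the in-bounds test 0 <= i < len(state) and 0 <= j < len(state[i])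
def pvInB (state : List (List (String × Int))) (i j : Int) : Bool :=
  decide (0 ≤ i) && decide (i < (state.length : Int)) && decide (0 ≤ j) && decide (j < ((pvRow state i).length : Int))
-- new[i][j] = v (callers guard the indexes, so toNat is exact)
def pvSet2 (g : List (List (String × Int))) (i j : Int) (v : String × Int) : List (List (String × Int)) :=
  g.modify i.toNat (fun row => row.modify j.toNat (fun _ => v))

def result_alt (state : List (List (String × Int))) (action : List (String × (Int × Int))) : List (List (String × Int)) :=
  let action_set : PySem.Set (Int × Int) := PySem.Set.ofList (action.map (·.2))
  -- pass 1: time passing only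
  let new1 : List (List (String × Int)) :=
    state.map (fun row => row.map (fun a =>
      if (a.1 == "S" && a.2 == 3) || (a.1 == "Q" && a.2 == 1) then ("H", (1 : Int))
      else (a.1, a.2 + 1)))
  -- pass 2: scatter infection from non-quarantined sick cells onto healthy neighbours
  let new2 : List (List (String × Int)) :=
    (PySem.List.enumerate state).foldl (fun g p =>
      (PySem.List.enumerate p.2).foldl (fun g2 q =>
        if q.2.1 == "S" && !(PySem.Set.contains action_set (p.1, q.1)) then
          [(p.1 + 1, q.1), (p.1 - 1, q.1), (p.1, q.1 + 1), (p.1, q.1 - 1)].foldl (fun g3 n =>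
            if pvInB state n.1 n.2 && ((pvCell state n.1 n.2).1 == "H") then
              pvSet2 g3 n.1 n.2 ("S", 1)
            else g3) g2
        else g2) g) new1
  -- pass 3: apply the action; indexes outside the grid are ignored
  action.foldl (fun g sub =>
    if pvInB state sub.2.1 sub.2.2 then
      pvSet2 g sub.2.1 sub.2.2
        (if (pvCell state sub.2.1 sub.2.2).1 == "S" then ("Q", 1) else ("I", 1))
    else g) new2

-- ===== PRECONDITION & SPEC =====
def Spec_result (state : List (List (String × Int))) (action : List (String × (Int × Int))) (out : List (List (String × Int))) : Prop := out = result_alt state action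
instance (state : List (List (String × Int))) (action : List (String × (Int × Int))) (out : List (List (String × Int))) : Decidable (Spec_result state action out) := by unfold Spec_result; infer_instance

-- ===== CLAIM (what is proved, stated in full; the proofs are below) =====
def Claim_equal_result : Prop := ∀ (state : List (List (String × Int))) (action : List (String × (Int × Int))), Dom_result state action → Spec_result state action (result state action)

-- ===== LEMMAS AND PROOFS =====

-- option cell access g[a][b]
def pvGetC (g : List (List (String × Int))) (a b : Nat) : Option (String × Int) :=
  (g[a]?).bind (fun r => r[b]?)

-- a loop that appends one element per iteration is init ++ map
theorem pv_foldl_app_map {α β : Type} (f : α → β) (l : List α) (init : List β) :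
    l.foldl (fun acc a => acc ++ [f a]) init = init ++ l.map f := by
  induction l generalizing init with
  | nil => simp
  | cons a l ih => simp [List.foldl_cons, ih]

-- membership in a conditional-append fold
theorem pv_mem_filtmap {α β : Type} (P : α → Bool) (f : α → β) (l : List α) (init : List β) (x : β) :
    x ∈ l.foldl (fun acc a => if P a then acc ++ [f a] else acc) init ↔
      x ∈ init ∨ ∃ a ∈ l, P a = true ∧ x = f a := by
  induction l generalizing init with
  | nil => simp
  | cons a l ih =>
    simp only [List.foldl_cons, ih]
    by_cases h : P a = true
    all_goals simp [h]
    all_goals tauto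

-- the nested A-side fold collecting sick locations
theorem pv_mem_Sloc {α : Type} (C : Int × List α → Int × α → Bool)
    (rs : List (Int × List α)) (init : List (Int × Int)) (x : Int × Int) :
    x ∈ rs.foldl (fun acc p =>
        (PySem.List.enumerate p.2).foldl (fun a2 q =>
          if C p q then a2 ++ [(p.1, q.1)] else a2) acc) init ↔
      x ∈ init ∨ ∃ p ∈ rs, ∃ q ∈ PySem.List.enumerate p.2, C p q = true ∧ x = (p.1, q.1) := by
  induction rs generalizing init with
  | nil => simp
  | cons r rs ih =>
    simp only [List.foldl_cons, ih, pv_mem_filtmap, List.exists_mem_cons_iff]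
    rw [or_assoc]

-- writing one cell: what every other cell sees
theorem pvGetC_set (g : List (List (String × Int))) (i j : Int) (v : String × Int) (a b : Nat) :
    pvGetC (pvSet2 g i j v) a b =
      if i.toNat = a ∧ j.toNat = b then (pvGetC g a b).map (fun _ => v) else pvGetC g a b := by
  unfold pvGetC pvSet2
  rw [List.getElem?_modify]
  cases h : g[a]? with
  | none => simp
  | some r =>
    by_cases hi : i.toNat = a
    · by_cases hj : j.toNat = b <;>
        cases hr : r[b]? <;>
          simp [hi, hj, hr]
    · simp [hi]

-- writing one cell preserves all row lengths
theorem pvRowlen_set (g : List (List (String × Int))) (i j : Int) (v : String × Int) (a : Nat) :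
    ((pvSet2 g i j v)[a]?).map List.length = (g[a]?).map List.length := by
  unfold pvSet2
  rw [List.getElem?_modify]
  cases h : g[a]? with
  | none => simp
  | some r => by_cases hi : i.toNat = a <;> simp [hi, List.length_modify]

-- a fold whose every step writes value v at (a,b) exactly when P x holds
theorem pvGetC_writefold {α : Type} (a b : Nat) (v : String × Int) (P : α → Bool)
    (S : List (List (String × Int)) → α → List (List (String × Int))) (l : List α)
    (h : ∀ x ∈ l, ∀ g, pvGetC (S g x) a b =
        if P x then (pvGetC g a b).map (fun _ => v) else pvGetC g a b)
    (g : List (List (String × Int))) :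
    pvGetC (l.foldl S g) a b =
      if l.any P then (pvGetC g a b).map (fun _ => v) else pvGetC g a b := by
  induction l generalizing g with
  | nil => simp
  | cons x l ih =>
    simp only [List.foldl_cons, List.any_cons]
    rw [ih (fun y hy => h y (List.mem_cons_of_mem x hy)), h x List.mem_cons_self]
    by_cases hl : l.any P = true <;> by_cases hx : P x = true <;>
      cases hg : pvGetC g a b <;> simp [hl, hx]

-- a fold whose every step preserves all row lengths
theorem pvRowlen_foldl {α : Type}
    (S : List (List (String × Int)) → α → List (List (String × Int))) (l : List α)
    (h : ∀ x ∈ l, ∀ (g : List (List (String × Int))) (a : Nat), ((S g x)[a]?).map List.length = (g[a]?).map List.length)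
    (g : List (List (String × Int))) (a : Nat) :
    ((l.foldl S g)[a]?).map List.length = (g[a]?).map List.length := by
  induction l generalizing g with
  | nil => simp
  | cons x l ih =>
    rw [List.foldl_cons, ih (fun y hy g' a' => h y (List.mem_cons_of_mem x hy) g' a'),
      h x List.mem_cons_self]

-- grids with equal row lengths and equal cells are equal
theorem pv_ext (g1 g2 : List (List (String × Int)))
    (hrow : ∀ (a : Nat), (g1[a]?).map List.length = (g2[a]?).map List.length)
    (hc : ∀ a b, pvGetC g1 a b = pvGetC g2 a b) : g1 = g2 := by
  apply List.ext_getElem?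
  intro a
  cases h1 : g1[a]? with
  | none =>
    have := hrow a
    rw [h1] at this
    cases h2 : g2[a]? with
    | none => rfl
    | some r2 => rw [h2] at this; simp at this
  | some r1 =>
    have hr := hrow a
    rw [h1] at hr
    cases h2 : g2[a]? with
    | none => rw [h2] at hr; simp at hr
    | some r2 =>
      rw [h2] at hr
      simp only [Option.map_some, Option.some.injEq] at hr
      congr 1
      apply List.ext_getElem?
      intro b
      have := hc a b
      unfold pvGetC at this
      rw [h1, h2] at this
      simpa using this

-- the common canonical cell value at grid position (a,b)
def pvACell (state : List (List (String × Int))) (action : List (String × (Int × Int)))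
    (a b : Nat) (area : String × Int) : String × Int :=
  if ((a : Int), (b : Int)) ∈ action.map (·.2) then
    (if area.1 == "S" then ("Q", 1) else ("I", 1))
  else if area.1 == "H" then
    (if ∃ p ∈ PySem.List.enumerate state, ∃ q ∈ PySem.List.enumerate p.2,
        (q.2.1 == "S" && !((action.map (·.2)).contains (p.1, q.1))) = true ∧
        ((p.1, q.1) = ((a : Int) + 1, (b : Int)) ∨ (p.1, q.1) = ((a : Int) - 1, (b : Int)) ∨
         (p.1, q.1) = ((a : Int), (b : Int) + 1) ∨ (p.1, q.1) = ((a : Int), (b : Int) - 1))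
     then ("S", 1) else ("H", area.2 + 1))
  else if area.1 == "S" && area.2 == 3 then ("H", 1)
  else if area.1 == "Q" && area.2 == 1 then ("H", 1)
  else (area.1, area.2 + 1)

-- A's side: row lengths
theorem pv_res_rowlen (state : List (List (String × Int))) (action : List (String × (Int × Int))) (a : Nat) :
    ((result state action)[a]?).map List.length = (state[a]?).map List.length := by
  unfold result
  simp only [pv_foldl_app_map, List.nil_append]
  cases h : state[a]? with
  | none => simp [h, PySem.List.getElem?_enumerate]
  | some row => simp [h, PySem.List.getElem?_enumerate, PySem.List.length_enumerate]

-- A's side: cells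
theorem pv_res_cell (state : List (List (String × Int))) (action : List (String × (Int × Int)))
    (a b : Nat) (row : List (String × Int)) (area : String × Int)
    (hrow : state[a]? = some row) (harea : row[b]? = some area) :
    pvGetC (result state action) a b = some (pvACell state action a b area) := by
  unfold result pvGetC
  simp only [pv_foldl_app_map, List.nil_append, List.getElem?_map, PySem.List.getElem?_enumerate,
    hrow, harea, Option.map_some, Option.bind_some, Option.some.injEq, zero_add]
  unfold pvACell
  by_cases hact : (((a : Int), (b : Int)) ∈ action.map (·.2))
  · simp [hact]
  · rw [if_neg (by simpa [List.contains_iff_mem] using hact), if_neg hact]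
    by_cases hH : (area.1 == "H") = true
    · simp only [hH, if_true]
      refine if_congr ?_ rfl rfl
      have hSloc : ∀ x : Int × Int,
          ((PySem.List.enumerate state).foldl (fun acc p =>
            (PySem.List.enumerate p.2).foldl (fun a2 q =>
              if q.2.1 == "S" && !((action.map (·.2)).contains (p.1, q.1)) then a2 ++ [(p.1, q.1)]
              else a2) acc) ([] : List (Int × Int))).contains x = true ↔
          ∃ p ∈ PySem.List.enumerate state, ∃ q ∈ PySem.List.enumerate p.2,
            (q.2.1 == "S" && !((action.map (·.2)).contains (p.1, q.1))) = true ∧ x = (p.1, q.1) := by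
        intro x
        rw [List.contains_iff_mem,
          pv_mem_Sloc (α := String × Int) (C := fun p q => q.2.1 == "S" && !((action.map (·.2)).contains (p.1, q.1)))]
        simp
      simp only [Bool.or_eq_true, hSloc]
      constructor
      · rintro (((h | h) | h) | h) <;> obtain ⟨p, hp, q, hq, hc, hx⟩ := h
        · exact ⟨p, hp, q, hq, hc, Or.inl hx.symm⟩
        · exact ⟨p, hp, q, hq, hc, Or.inr (Or.inl hx.symm)⟩
        · exact ⟨p, hp, q, hq, hc, Or.inr (Or.inr (Or.inl hx.symm))⟩
        · exact ⟨p, hp, q, hq, hc, Or.inr (Or.inr (Or.inr hx.symm))⟩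
      · rintro ⟨p, hp, q, hq, hc, (hx | hx | hx | hx)⟩
        · exact Or.inl (Or.inl (Or.inl ⟨p, hp, q, hq, hc, hx.symm⟩))
        · exact Or.inl (Or.inl (Or.inr ⟨p, hp, q, hq, hc, hx.symm⟩))
        · exact Or.inl (Or.inr ⟨p, hp, q, hq, hc, hx.symm⟩)
        · exact Or.inr ⟨p, hp, q, hq, hc, hx.symm⟩
    · simp only [hH]
      rfl

-- B's pass-3 step preserves row lengths
theorem pv_rowlen_p3 (state : List (List (String × Int))) (action : List (String × (Int × Int)))
    (g : List (List (String × Int))) (a : Nat) :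
    ((action.foldl (fun g sub =>
        if pvInB state sub.2.1 sub.2.2 then
          pvSet2 g sub.2.1 sub.2.2
            (if (pvCell state sub.2.1 sub.2.2).1 == "S" then ("Q", 1) else ("I", 1))
        else g) g)[a]?).map List.length = (g[a]?).map List.length :=
  pvRowlen_foldl _ action
    (fun x _ g a => by
      by_cases h : pvInB state x.2.1 x.2.2 = true <;> simp [h, pvRowlen_set]) g a

-- B's pass-2 step preserves row lengths
theorem pv_rowlen_p2 (state : List (List (String × Int))) (aset : PySem.Set (Int × Int))
    (g : List (List (String × Int))) (a : Nat) :
    (((PySem.List.enumerate state).foldl (fun g p =>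
        (PySem.List.enumerate p.2).foldl (fun g2 q =>
          if q.2.1 == "S" && !(PySem.Set.contains aset (p.1, q.1)) then
            [(p.1 + 1, q.1), (p.1 - 1, q.1), (p.1, q.1 + 1), (p.1, q.1 - 1)].foldl (fun g3 n =>
              if pvInB state n.1 n.2 && ((pvCell state n.1 n.2).1 == "H") then
                pvSet2 g3 n.1 n.2 ("S", 1)
              else g3) g2
          else g2) g) g)[a]?).map List.length = (g[a]?).map List.length := by
  refine pvRowlen_foldl _ _ ?_ g a
  intro p _ g a
  refine pvRowlen_foldl _ _ ?_ g a
  intro q _ g2 a2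
  by_cases hs : (q.2.1 == "S" && !(PySem.Set.contains aset (p.1, q.1))) = true
  · rw [if_pos hs]
    refine pvRowlen_foldl _ _ ?_ g2 a2
    intro n _ g3 a3
    by_cases hg : (pvInB state n.1 n.2 && ((pvCell state n.1 n.2).1 == "H")) = true
    · rw [if_pos hg]; exact pvRowlen_set _ _ _ _ _
    · rw [if_neg hg]
  · rw [if_neg hs]

-- B's side: row lengths
theorem pv_alt_rowlen (state : List (List (String × Int))) (action : List (String × (Int × Int))) (a : Nat) :
    ((result_alt state action)[a]?).map List.length = (state[a]?).map List.length := by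
  unfold result_alt
  rw [pv_rowlen_p3, pv_rowlen_p2]
  cases h : state[a]? <;> simp [h]

-- in-range facts
theorem pv_pvRow_eq (state : List (List (String × Int))) (a : Nat) (row : List (String × Int))
    (hrow : state[a]? = some row) : pvRow state (a : Int) = row := by
  simp [pvRow, List.getD_eq_getElem?_getD, hrow]

theorem pv_pvCell_eq (state : List (List (String × Int))) (a b : Nat) (row : List (String × Int))
    (area : String × Int) (hrow : state[a]? = some row) (harea : row[b]? = some area) :
    pvCell state (a : Int) (b : Int) = area := by
  simp [pvCell, pv_pvRow_eq state a row hrow, List.getD_eq_getElem?_getD, harea]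

theorem pv_pvInB_true (state : List (List (String × Int))) (a b : Nat) (row : List (String × Int))
    (hrow : state[a]? = some row) (hb : b < row.length) : pvInB state (a : Int) (b : Int) = true := by
  have ha : a < state.length := (List.getElem?_eq_some_iff.mp hrow).1
  simp only [pvInB, pv_pvRow_eq state a row hrow]
  simp
  omega

-- B's pass-3 step writes the action value at (a,b) exactly when the action names (a,b)
theorem pv_step3 (state : List (List (String × Int))) (a b : Nat) (row : List (String × Int))
    (area : String × Int) (hrow : state[a]? = some row) (harea : row[b]? = some area) :
    ∀ sub : String × (Int × Int), ∀ g,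
      pvGetC (if pvInB state sub.2.1 sub.2.2 then
          pvSet2 g sub.2.1 sub.2.2
            (if (pvCell state sub.2.1 sub.2.2).1 == "S" then ("Q", 1) else ("I", 1))
        else g) a b =
      if (sub.2 == (((a : Int)), ((b : Int)))) then
        (pvGetC g a b).map (fun _ => (if area.1 == "S" then ("Q", (1 : Int)) else ("I", 1)))
      else pvGetC g a b := by
  intro sub g
  have hb : b < row.length := (List.getElem?_eq_some_iff.mp harea).1
  by_cases hin : pvInB state sub.2.1 sub.2.2 = true
  · rw [if_pos hin, pvGetC_set]
    by_cases heq : (sub.2 == (((a : Int)), ((b : Int)))) = true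
    · have h2 : sub.2 = (((a : Int)), ((b : Int))) := by simpa using heq
      rw [if_pos (by rw [h2]; simp), heq, if_pos rfl]
      rw [h2]
      rw [pv_pvCell_eq state a b row area hrow harea]
    · rw [if_neg, if_neg (by simpa using heq)]
      intro hcon
      simp only [pvInB, Bool.and_eq_true, decide_eq_true_eq] at hin
      apply heq
      have h1 : sub.2.1 = (a : Int) := by omega
      have h2 : sub.2.2 = (b : Int) := by omega
      simp [Prod.ext_iff, h1, h2]
  · rw [if_neg hin, if_neg]
    intro hcon
    have h2 : sub.2 = (((a : Int)), ((b : Int))) := by simpa using hcon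
    apply hin
    have e1 : sub.2.1 = (a : Int) := by rw [h2]
    have e2 : sub.2.2 = (b : Int) := by rw [h2]
    rw [e1, e2]
    exact pv_pvInB_true state a b row hrow hb

-- B's innermost pass-2 step: one neighbour write
theorem pv_step2inner (state : List (List (String × Int))) (a b : Nat)
    (row : List (String × Int)) (area : String × Int)
    (hrow : state[a]? = some row) (harea : row[b]? = some area) :
    ∀ n : Int × Int, ∀ g3,
      pvGetC (if pvInB state n.1 n.2 && ((pvCell state n.1 n.2).1 == "H") then
          pvSet2 g3 n.1 n.2 ("S", 1) else g3) a b =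
      if (n == (((a : Int)), ((b : Int))) && (area.1 == "H")) then
        (pvGetC g3 a b).map (fun _ => (("S", 1) : String × Int))
      else pvGetC g3 a b := by
  intro n g3
  have hb : b < row.length := (List.getElem?_eq_some_iff.mp harea).1
  by_cases hg : (pvInB state n.1 n.2 && ((pvCell state n.1 n.2).1 == "H")) = true
  · rw [if_pos hg, pvGetC_set]
    rw [Bool.and_eq_true] at hg
    obtain ⟨hin, hH'⟩ := hg
    by_cases heq : (n == (((a : Int)), ((b : Int)))) = true
    · have h2 : n = (((a : Int)), ((b : Int))) := by simpa using heq
      rw [if_pos (by rw [h2]; simp)]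
      rw [h2, pv_pvCell_eq state a b row area hrow harea] at hH'
      rw [if_pos (by rw [heq, hH']; rfl)]
    · rw [if_neg, if_neg (by simp [heq])]
      intro hcon
      simp only [pvInB, Bool.and_eq_true, decide_eq_true_eq] at hin
      apply heq
      have h1 : n.1 = (a : Int) := by omega
      have h2 : n.2 = (b : Int) := by omega
      simp [Prod.ext_iff, h1, h2]
  · rw [if_neg hg, if_neg]
    intro hcon
    rw [Bool.and_eq_true] at hcon
    obtain ⟨heq, hH'⟩ := hcon
    have h2 : n = (((a : Int)), ((b : Int))) := by simpa using heq
    apply hg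
    rw [h2, pv_pvInB_true state a b row hrow hb,
      pv_pvCell_eq state a b row area hrow harea, hH']
    rfl

-- B's pass-2 outer step: scattering from one grid row
theorem pv_step2 (state : List (List (String × Int))) (action : List (String × (Int × Int)))
    (a b : Nat) (row : List (String × Int)) (area : String × Int)
    (hrow : state[a]? = some row) (harea : row[b]? = some area) :
    ∀ p : Int × List (String × Int), ∀ g,
      pvGetC ((PySem.List.enumerate p.2).foldl (fun g2 q =>
          if q.2.1 == "S" && !(PySem.Set.contains (PySem.Set.ofList (action.map (·.2))) (p.1, q.1)) then
            [(p.1 + 1, q.1), (p.1 - 1, q.1), (p.1, q.1 + 1), (p.1, q.1 - 1)].foldl (fun g3 n =>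
              if pvInB state n.1 n.2 && ((pvCell state n.1 n.2).1 == "H") then
                pvSet2 g3 n.1 n.2 ("S", 1)
              else g3) g2
          else g2) g) a b =
      if (PySem.List.enumerate p.2).any (fun q =>
          (q.2.1 == "S" && !(PySem.Set.contains (PySem.Set.ofList (action.map (·.2))) (p.1, q.1))) &&
          ([(p.1 + 1, q.1), (p.1 - 1, q.1), (p.1, q.1 + 1), (p.1, q.1 - 1)].any
            (fun n => n == (((a : Int)), ((b : Int))) && (area.1 == "H")))) then
        (pvGetC g a b).map (fun _ => (("S", 1) : String × Int))
      else pvGetC g a b := by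
  intro p g
  refine pvGetC_writefold a b ("S", 1) _ _ _ ?_ g
  intro q hq g2
  by_cases hs : (q.2.1 == "S" && !(PySem.Set.contains (PySem.Set.ofList (action.map (·.2))) (p.1, q.1))) = true
  · rw [if_pos hs,
      pvGetC_writefold a b (("S", 1) : String × Int)
        (fun n => n == (((a : Int)), ((b : Int))) && (area.1 == "H")) _
        [(p.1 + 1, q.1), (p.1 - 1, q.1), (p.1, q.1 + 1), (p.1, q.1 - 1)]
        (fun n _ g3 => pv_step2inner state a b row area hrow harea n g3) g2,
      hs, Bool.true_and]
  · rw [if_neg hs, if_neg]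
    intro hcon
    rw [Bool.and_eq_true] at hcon
    exact hs hcon.1

-- B's side: cells
theorem pv_alt_cell (state : List (List (String × Int))) (action : List (String × (Int × Int)))
    (a b : Nat) (row : List (String × Int)) (area : String × Int)
    (hrow : state[a]? = some row) (harea : row[b]? = some area) :
    pvGetC (result_alt state action) a b = some (pvACell state action a b area) := by
  unfold result_alt
  dsimp only
  rw [pvGetC_writefold a b (if area.1 == "S" then ("Q", (1 : Int)) else ("I", 1))
      (fun sub => sub.2 == (((a : Int)), ((b : Int)))) _ action
      (fun sub _ g => pv_step3 state a b row area hrow harea sub g) _,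
    pvGetC_writefold a b (("S", 1) : String × Int)
      (fun p => (PySem.List.enumerate p.2).any (fun q =>
          (q.2.1 == "S" && !(PySem.Set.contains (PySem.Set.ofList (action.map (·.2))) (p.1, q.1))) &&
          ([(p.1 + 1, q.1), (p.1 - 1, q.1), (p.1, q.1 + 1), (p.1, q.1 - 1)].any
            (fun n => n == (((a : Int)), ((b : Int))) && (area.1 == "H"))))) _
      (PySem.List.enumerate state)
      (fun p _ g => pv_step2 state action a b row area hrow harea p g) _]
  have hnew1 : pvGetC (state.map (fun row => row.map (fun a =>
      if (a.1 == "S" && a.2 == 3) || (a.1 == "Q" && a.2 == 1) then ("H", (1 : Int))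
      else (a.1, a.2 + 1)))) a b =
      some (if (area.1 == "S" && area.2 == 3) || (area.1 == "Q" && area.2 == 1) then ("H", (1 : Int))
        else (area.1, area.2 + 1)) := by
    simp [pvGetC, List.getElem?_map, hrow, harea]
  rw [hnew1]
  unfold pvACell
  by_cases hact : (((a : Int), (b : Int)) ∈ action.map (·.2))
  · have hA3 : (action.any (fun sub => sub.2 == (((a : Int)), ((b : Int))))) = true := by
      obtain ⟨sub, hsub, hs2⟩ := List.mem_map.mp hact
      exact List.any_eq_true.mpr ⟨sub, hsub, by simp [hs2]⟩
    rw [if_pos hA3, if_pos hact]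
    by_cases hA2 : ((PySem.List.enumerate state).any (fun p => (PySem.List.enumerate p.2).any (fun q =>
          (q.2.1 == "S" && !(PySem.Set.contains (PySem.Set.ofList (action.map (·.2))) (p.1, q.1))) &&
          ([(p.1 + 1, q.1), (p.1 - 1, q.1), (p.1, q.1 + 1), (p.1, q.1 - 1)].any
            (fun n => n == (((a : Int)), ((b : Int))) && (area.1 == "H")))))) = true
    · rw [if_pos hA2]
      simp only [Option.map_some]
    · rw [if_neg hA2]
      simp only [Option.map_some]
  · have hA3 : (action.any (fun sub => sub.2 == (((a : Int)), ((b : Int))))) = false := by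
      rw [List.any_eq_false]
      intro sub hsub hcon
      exact hact (List.mem_map.mpr ⟨sub, hsub, by simpa using hcon⟩)
    rw [if_neg (by rw [hA3]; exact Bool.false_ne_true), if_neg hact]
    by_cases hH : (area.1 == "H") = true
    · rw [if_pos hH]
      have hiff : ((PySem.List.enumerate state).any (fun p => (PySem.List.enumerate p.2).any (fun q =>
            (q.2.1 == "S" && !(PySem.Set.contains (PySem.Set.ofList (action.map (·.2))) (p.1, q.1))) &&
            ([(p.1 + 1, q.1), (p.1 - 1, q.1), (p.1, q.1 + 1), (p.1, q.1 - 1)].any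
              (fun n => n == (((a : Int)), ((b : Int))) && (area.1 == "H")))))) = true ↔
          (∃ p ∈ PySem.List.enumerate state, ∃ q ∈ PySem.List.enumerate p.2,
            (q.2.1 == "S" && !((action.map (·.2)).contains (p.1, q.1))) = true ∧
            ((p.1, q.1) = ((a : Int) + 1, (b : Int)) ∨ (p.1, q.1) = ((a : Int) - 1, (b : Int)) ∨
             (p.1, q.1) = ((a : Int), (b : Int) + 1) ∨ (p.1, q.1) = ((a : Int), (b : Int) - 1))) := by
        have hsickeq : ∀ x : Int × Int,
            (PySem.Set.contains (PySem.Set.ofList (action.map (·.2))) x) = ((action.map (·.2)).contains x) := by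
          intro x
          rw [Bool.eq_iff_iff, PySem.Set.contains_iff, PySem.Set.mem_ofList, List.contains_iff_mem]
        simp only [List.any_eq_true, hsickeq, hH, Bool.and_true, List.any_cons, List.any_nil,
          Bool.or_false, Prod.mk.injEq]
        constructor
        · rintro ⟨p, hp, q, hq, hall⟩
          rw [Bool.and_eq_true] at hall
          obtain ⟨hsick, hnb⟩ := hall
          refine ⟨p, hp, q, hq, hsick, ?_⟩
          try simp only [Bool.or_eq_true, beq_iff_eq, Prod.mk.injEq] at hnb
          try simp only [Prod.mk.injEq]
          omega
        · rintro ⟨p, hp, q, hq, hsick, hnb⟩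
          refine ⟨p, hp, q, hq, ?_⟩
          rw [Bool.and_eq_true]
          refine ⟨hsick, ?_⟩
          try simp only [Bool.or_eq_true, beq_iff_eq, Prod.mk.injEq]
          try simp only [Prod.mk.injEq] at hnb
          omega
      by_cases hA2 : ((PySem.List.enumerate state).any (fun p => (PySem.List.enumerate p.2).any (fun q =>
            (q.2.1 == "S" && !(PySem.Set.contains (PySem.Set.ofList (action.map (·.2))) (p.1, q.1))) &&
            ([(p.1 + 1, q.1), (p.1 - 1, q.1), (p.1, q.1 + 1), (p.1, q.1 - 1)].any
              (fun n => n == (((a : Int)), ((b : Int))) && (area.1 == "H")))))) = true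
      · rw [if_pos hA2, if_pos (hiff.mp hA2)]
        simp only [Option.map_some]
      · rw [if_neg hA2, if_neg (fun hc => hA2 (hiff.mpr hc))]
        have harea1 : area.1 = "H" := by simpa using hH
        simp [harea1]
    · have hH' : (area.1 == "H") = false := by simpa using hH
      have hA2 : ((PySem.List.enumerate state).any (fun p => (PySem.List.enumerate p.2).any (fun q =>
            (q.2.1 == "S" && !(PySem.Set.contains (PySem.Set.ofList (action.map (·.2))) (p.1, q.1))) &&
            ([(p.1 + 1, q.1), (p.1 - 1, q.1), (p.1, q.1 + 1), (p.1, q.1 - 1)].any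
              (fun n => n == (((a : Int)), ((b : Int))) && (area.1 == "H")))))) = false := by
        rw [List.any_eq_false]
        intro p hp
        rw [Bool.not_eq_true, List.any_eq_false]
        intro q hq
        simp [hH']
      rw [if_neg (by rw [hA2]; exact Bool.false_ne_true), if_neg hH]
      by_cases h1 : (area.1 == "S" && area.2 == 3) = true <;>
        by_cases h2 : (area.1 == "Q" && area.2 == 1) = true <;>
          simp [h1, h2]

-- a grid column beyond its row bounds reads none
theorem pv_cell_none (g state : List (List (String × Int))) (a b : Nat)
    (hlen : (g[a]?).map List.length = (state[a]?).map List.length)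
    (hnone : (state[a]?).bind (fun r => r[b]?) = none) : pvGetC g a b = none := by
  unfold pvGetC
  cases hs : state[a]? with
  | none =>
    rw [hs] at hlen
    cases hg : g[a]? with
    | none => rfl
    | some r => rw [hg] at hlen; simp at hlen
  | some row =>
    rw [hs] at hlen hnone
    simp only [Option.bind_some] at hnone
    cases hg : g[a]? with
    | none => rfl
    | some r =>
      rw [hg] at hlen
      simp only [Option.map_some, Option.some.injEq] at hlen
      simp only [Option.bind_some]
      rw [List.getElem?_eq_none_iff] at hnone ⊢
      omega

theorem result_eq_alt (state : List (List (String × Int))) (action : List (String × (Int × Int))) :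
    result state action = result_alt state action := by
  apply pv_ext
  · intro a
    rw [pv_res_rowlen, pv_alt_rowlen]
  · intro a b
    cases hrow : state[a]? with
    | none =>
      rw [pv_cell_none (result state action) state a b (pv_res_rowlen state action a) (by rw [hrow]; rfl),
        pv_cell_none (result_alt state action) state a b (pv_alt_rowlen state action a) (by rw [hrow]; rfl)]
    | some row =>
      cases harea : row[b]? with
      | none =>
        rw [pv_cell_none (result state action) state a b (pv_res_rowlen state action a) (by rw [hrow]; simpa using harea),
          pv_cell_none (result_alt state action) state a b (pv_alt_rowlen state action a) (by rw [hrow]; simpa using harea)]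
      | some area =>
        rw [pv_res_cell state action a b row area hrow harea,
          pv_alt_cell state action a b row area hrow harea]

-- ===== VERDICT (by name: the statement is the Claim_ definition above) =====

theorem result_spec : Claim_equal_result := by
  intro state action _
  unfold Spec_result
  exact result_eq_alt state action
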